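-- pv_equiv track=rewrite | github.com/Grycl04/grycl04.github.io | backend/chatbot_backend.py | check_amenities_for_landmark
-- ===== SOURCE A (Python) =====
-- from typing import Dict, List, Any, Optional
--
-- def check_amenities_for_landmark(property_data: Dict[str, Any], landmark_type: str) -> bool:
--     """Check if amenities list mentions schools or educational facilities"""
--     amenities = property_data.get('amenities', [])
--
--     if landmark_type == 'school':
--         school_amenities = [
--             'school', 'education', 'campus', 'university', 'college',
--             'academic', 'student', 'learning', 'study', 'educational'
--         ]
--
--         for amenity in amenities:
--             amenity_lower = str(amenity).lower()
--             for keyword in school_amenities: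
--                 if keyword in amenity_lower:
--                     return True
--
--     return False
-- ===== SOURCE B (Python) =====
-- def check_amenities_for_landmark(property_data, landmark_type):
--     if landmark_type != 'school':
--         return False
--     # 'educational' is dropped: it contains 'education', so it can never match alone
--     keywords = ('school', 'education', 'campus', 'university', 'college',
--                 'academic', 'student', 'learning', 'study')
--
--     def hit(text):
--         # position-major scan: at each position, does some keyword start here?
--         for i in range(len(text)):
--             for k in keywords:
--                 if text.startswith(k, i):
--                     return True
--         return False
--
--     return any(hit(str(a).lower()) for a in property_data.get('amenities', []))
-- ===== Notes on version B (the rewrite author's own statement) =====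
-- stated objective: alternative
-- what changed: Replaces A's keyword-major inner loop (one full substring search per keyword per amenity) with a position-major scan of each lowercased amenity (at each index, test whether one of the keywords starts there), and drops the redundant keyword 'educational', which contains 'education' and so can never match alone.
import Mathlib
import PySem

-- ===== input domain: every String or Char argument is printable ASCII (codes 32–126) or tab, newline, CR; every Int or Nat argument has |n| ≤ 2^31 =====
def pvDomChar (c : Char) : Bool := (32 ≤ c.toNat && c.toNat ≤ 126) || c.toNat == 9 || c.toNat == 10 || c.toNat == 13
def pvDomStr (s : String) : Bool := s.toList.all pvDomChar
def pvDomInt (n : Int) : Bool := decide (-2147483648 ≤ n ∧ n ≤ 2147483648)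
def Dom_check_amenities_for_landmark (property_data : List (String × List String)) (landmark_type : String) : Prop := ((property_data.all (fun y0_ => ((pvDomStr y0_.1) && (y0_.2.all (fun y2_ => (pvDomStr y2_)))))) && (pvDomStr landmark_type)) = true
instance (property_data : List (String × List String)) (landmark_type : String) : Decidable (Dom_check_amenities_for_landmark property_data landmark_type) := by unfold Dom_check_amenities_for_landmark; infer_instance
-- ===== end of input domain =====

-- B replaces A's keyword-major substring loop by a single position-major scan of each
-- amenity (startswith at every index) over a 9-keyword set ('educational' is redundant,
-- it contains 'education'); objective: alternative.


-- ===== PORT A =====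
def schoolAmenitiesA : List String :=
  ["school", "education", "campus", "university", "college",
   "academic", "student", "learning", "study", "educational"]

-- inner loop: for keyword in school_amenities: if keyword in amenity_lower: return True
def innerLoopA : List String → String → Bool
  | [], _ => false
  | k :: ks, amenity_lower =>
    if PySem.Str.isIn k amenity_lower then true else innerLoopA ks amenity_lower

-- outer loop: for amenity in amenities (str(amenity) is the identity here: amenities are strings)
def outerLoopA : List String → Bool
  | [] => false
  | a :: rest =>
    let amenity_lower := PySem.Str.lower a
    if innerLoopA schoolAmenitiesA amenity_lower then true else outerLoopA rest

def check_amenities_for_landmark (property_data : List (String × List String)) (landmark_type : String) : Bool :=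
  let amenities := PySem.Dict.getD (PySem.Dict.mk property_data) "amenities" []
  if landmark_type == "school" then outerLoopA amenities else false

-- ===== PORT B =====
def keywordsB : List (List Char) :=
  ["school".toList, "education".toList, "campus".toList, "university".toList,
   "college".toList, "academic".toList, "student".toList, "learning".toList, "study".toList]

-- hit(text): for i in range(len(text)): if any keyword starts at i: return True
def hitB : List Char → Bool
  | [] => false
  | c :: rest =>
    if keywordsB.any (fun k => PySem.Chars.startswith (c :: rest) k) then true else hitB rest

def check_amenities_for_landmark_alt (property_data : List (String × List String)) (landmark_type : String) : Bool :=
  if landmark_type != "school" then false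
  else
    (PySem.Dict.getD (PySem.Dict.mk property_data) "amenities" []).any
      (fun a => hitB (PySem.Str.lower a).toList)

-- ===== PRECONDITION & SPEC =====
def Spec_check_amenities_for_landmark (property_data : List (String × List String)) (landmark_type : String) (out : Bool) : Prop := out = check_amenities_for_landmark_alt property_data landmark_type
instance (property_data : List (String × List String)) (landmark_type : String) (out : Bool) : Decidable (Spec_check_amenities_for_landmark property_data landmark_type out) := by unfold Spec_check_amenities_for_landmark; infer_instance

-- ===== CLAIM (what is proved, stated in full; the proofs are below) =====
def Claim_equal_check_amenities_for_landmark : Prop := ∀ (property_data : List (String × List String)) (landmark_type : String), Dom_check_amenities_for_landmark property_data landmark_type → Spec_check_amenities_for_landmark property_data landmark_type (check_amenities_for_landmark property_data landmark_type)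

-- ===== LEMMAS AND PROOFS =====

theorem hitB_iff (cs : List Char) : hitB cs = true ↔ ∃ k ∈ keywordsB, k <:+: cs := by
  induction cs with
  | nil =>
    simp only [hitB]
    constructor
    · intro h; exact absurd h (by decide)
    · rintro ⟨k, hk, hinf⟩
      have : k = [] := List.eq_nil_of_infix_nil hinf
      subst this
      simp [keywordsB] at hk
  | cons c rest ih =>
    simp only [hitB]
    by_cases h : keywordsB.any (fun k => PySem.Chars.startswith (c :: rest) k) = true
    · simp only [h, if_true, true_iff]
      rcases List.any_eq_true.mp h with ⟨k, hk, hsw⟩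
      exact ⟨k, hk, ((PySem.Chars.startswith_iff _ _).mp hsw).isInfix⟩
    · rw [if_neg h, ih]
      constructor
      · rintro ⟨k, hk, hinf⟩; exact ⟨k, hk, hinf.trans (List.suffix_cons c rest).isInfix⟩
      · rintro ⟨k, hk, hinf⟩
        rcases List.infix_cons_iff.mp hinf with hpre | hinf'
        · exact absurd (List.any_eq_true.mpr ⟨k, hk, (PySem.Chars.startswith_iff _ _).mpr hpre⟩) h
        · exact ⟨k, hk, hinf'⟩

theorem innerA_any (al : String) (ks : List String) :
    innerLoopA ks al = true ↔ ∃ k ∈ ks, k.toList <:+: al.toList := by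
  induction ks with
  | nil => simp [innerLoopA]
  | cons k ks ih =>
    simp only [innerLoopA]
    by_cases h : PySem.Str.isIn k al = true
    · simp only [h, if_true, true_iff]
      exact ⟨k, List.mem_cons_self, (PySem.Chars.isIn_iff_infix _ _).mp (by simpa using h)⟩
    · have h' : ¬ k.toList <:+: al.toList := fun hc =>
        h (by simpa using (PySem.Chars.isIn_iff_infix _ _).mpr hc)
      rw [if_neg h, ih]
      simp [List.mem_cons, h']

theorem perAmenity (a : String) :
    innerLoopA schoolAmenitiesA (PySem.Str.lower a) = hitB (PySem.Str.lower a).toList := by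
  rw [Bool.eq_iff_iff, innerA_any, hitB_iff]
  set cs := (PySem.Str.lower a).toList
  constructor
  · rintro ⟨k, hk, hinf⟩
    simp only [schoolAmenitiesA, List.mem_cons, List.not_mem_nil, or_false] at hk
    rcases hk with rfl | rfl | rfl | rfl | rfl | rfl | rfl | rfl | rfl | rfl
    · exact ⟨"school".toList, by simp [keywordsB], hinf⟩
    · exact ⟨"education".toList, by simp [keywordsB], hinf⟩
    · exact ⟨"campus".toList, by simp [keywordsB], hinf⟩
    · exact ⟨"university".toList, by simp [keywordsB], hinf⟩
    · exact ⟨"college".toList, by simp [keywordsB], hinf⟩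
    · exact ⟨"academic".toList, by simp [keywordsB], hinf⟩
    · exact ⟨"student".toList, by simp [keywordsB], hinf⟩
    · exact ⟨"learning".toList, by simp [keywordsB], hinf⟩
    · exact ⟨"study".toList, by simp [keywordsB], hinf⟩
    · -- 'educational' case: 'education' is an infix of it
      exact ⟨"education".toList, by simp [keywordsB],
        List.IsInfix.trans (by decide : "education".toList <:+: "educational".toList) hinf⟩
  · rintro ⟨k, hk, hinf⟩
    simp only [keywordsB, List.mem_cons, List.not_mem_nil, or_false] at hk
    rcases hk with rfl | rfl | rfl | rfl | rfl | rfl | rfl | rfl | rfl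
    · exact ⟨"school", by simp [schoolAmenitiesA], hinf⟩
    · exact ⟨"education", by simp [schoolAmenitiesA], hinf⟩
    · exact ⟨"campus", by simp [schoolAmenitiesA], hinf⟩
    · exact ⟨"university", by simp [schoolAmenitiesA], hinf⟩
    · exact ⟨"college", by simp [schoolAmenitiesA], hinf⟩
    · exact ⟨"academic", by simp [schoolAmenitiesA], hinf⟩
    · exact ⟨"student", by simp [schoolAmenitiesA], hinf⟩
    · exact ⟨"learning", by simp [schoolAmenitiesA], hinf⟩
    · exact ⟨"study", by simp [schoolAmenitiesA], hinf⟩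

theorem outerA_eq_any (amenities : List String) :
    outerLoopA amenities = amenities.any (fun a => hitB (PySem.Str.lower a).toList) := by
  induction amenities with
  | nil => rfl
  | cons a rest ih =>
    simp only [outerLoopA, List.any_cons, perAmenity a, ih]
    cases hitB (PySem.Str.lower a).toList <;> simp

-- ===== VERDICT (by name: the statement is the Claim_ definition above) =====
theorem check_amenities_for_landmark_spec : Claim_equal_check_amenities_for_landmark := by
  intro pd lt _
  unfold Spec_check_amenities_for_landmark check_amenities_for_landmark check_amenities_for_landmark_alt
  by_cases h : lt = "school"
  · subst h
    simp only [BEq.rfl, if_true, bne_self_eq_false, Bool.false_eq_true, if_false]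
    exact outerA_eq_any _
  · simp [h]
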